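-- pv_equiv track=rewrite | github.com/scprogramming/Open-Source-Scan | projectFunctions.py | indexMappedDependencies
-- ===== SOURCE A (Python) =====
-- def indexMappedDependencies(mappedDependencies):
--     depDict = dict()
--
--     for items in mappedDependencies:
--         product = items[0]
--         productReference = items[1]
--
--         if product not in depDict:
--             depDict[product] = [productReference]
--         elif product in depDict:
--             depDict[product].append(productReference)
--
--     return depDict
-- ===== SOURCE B (Python) =====
-- def indexMappedDependencies(mappedDependencies):
--     keys = list(dict.fromkeys(p for p, _ in mappedDependencies))
--     return {k: [r for p, r in mappedDependencies if p == k] for k in keys}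
-- ===== Notes on version B (the rewrite author's own statement) =====
-- stated objective: alternative
-- what changed: Instead of one hashing pass that inserts/appends per pair, B first dedups the products in first-occurrence order and then builds each product's reference list by a comprehension filtering the input per key.
import Mathlib
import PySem

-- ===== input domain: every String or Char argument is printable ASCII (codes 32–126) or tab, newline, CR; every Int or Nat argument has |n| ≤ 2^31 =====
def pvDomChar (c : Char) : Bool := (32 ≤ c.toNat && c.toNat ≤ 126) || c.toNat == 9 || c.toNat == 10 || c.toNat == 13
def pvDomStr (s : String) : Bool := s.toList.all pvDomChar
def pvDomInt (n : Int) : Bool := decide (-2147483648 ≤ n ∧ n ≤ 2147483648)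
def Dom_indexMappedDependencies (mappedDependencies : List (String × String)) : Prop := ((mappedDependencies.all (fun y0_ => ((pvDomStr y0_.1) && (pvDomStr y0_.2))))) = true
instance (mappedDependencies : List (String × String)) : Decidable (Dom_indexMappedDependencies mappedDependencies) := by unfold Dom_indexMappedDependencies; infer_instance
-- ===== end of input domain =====

-- B groups by building the per-product lists from the deduplicated key list instead of A's single insert/append hashing pass; objective: alternative.

-- ===== PORT A =====
-- one pass: for each (product, ref), insert [ref] for a new product, else append ref
def indexMappedDependencies (mappedDependencies : List (String × String)) : List (String × List String) :=
  (mappedDependencies.foldl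
    (fun depDict items =>
      let product := items.1
      let productReference := items.2
      if ¬ depDict.contains product then
        depDict.insert product [productReference]
      else
        depDict.modify product [] (fun l => l ++ [productReference]))
    PySem.Dict.empty).items

-- ===== PORT B =====
-- keys = list(dict.fromkeys(...)); then a dict comprehension filtering the input per key
def indexMappedDependencies_alt (mappedDependencies : List (String × String)) : List (String × List String) :=
  let keys := PySem.List.dedup (mappedDependencies.map (·.1))
  keys.map (fun k => (k, (mappedDependencies.filter (fun p => p.1 == k)).map (·.2)))

-- ===== PRECONDITION & SPEC =====
def Spec_indexMappedDependencies (mappedDependencies : List (String × String)) (out : List (String × List String)) : Prop := out = indexMappedDependencies_alt mappedDependencies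
instance (mappedDependencies : List (String × String)) (out : List (String × List String)) : Decidable (Spec_indexMappedDependencies mappedDependencies out) := by unfold Spec_indexMappedDependencies; infer_instance

-- ===== CLAIM (what is proved, stated in full; the proofs are below) =====
def Claim_equal_indexMappedDependencies : Prop := ∀ (mappedDependencies : List (String × String)), Dom_indexMappedDependencies mappedDependencies → Spec_indexMappedDependencies mappedDependencies (indexMappedDependencies mappedDependencies)

-- ===== LEMMAS AND PROOFS =====

-- A's loop body is exactly Python's d.modify(product, [], · ++ [ref]) in both branches
theorem pvStep_eq_modify (d : PySem.Dict String (List String)) (items : String × String) :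
    (if ¬ d.contains items.1 then d.insert items.1 [items.2]
     else d.modify items.1 [] (fun l => l ++ [items.2]))
    = d.modify items.1 [] (fun l => l ++ [items.2]) := by
  by_cases h : d.contains items.1
  · simp [h]
  · have hc : d.contains items.1 = false := by simpa using h
    simp [h, PySem.Dict.modify, PySem.Dict.getD_of_not_contains (h := hc)]

theorem pvFold_eq_modify (mappedDependencies : List (String × String)) :
    indexMappedDependencies mappedDependencies
    = (mappedDependencies.foldl
        (fun d p => d.modify p.1 [] (fun l => l ++ [p.2])) PySem.Dict.empty).items := by
  unfold indexMappedDependencies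
  congr 1
  apply PySem.List.foldl_congr_mem
  intro d p _
  simpa using pvStep_eq_modify d p

-- ===== VERDICT (by name: the statement is the Claim_ definition above) =====
theorem indexMappedDependencies_spec : Claim_equal_indexMappedDependencies := by
  intro md _
  unfold Spec_indexMappedDependencies indexMappedDependencies_alt
  rw [pvFold_eq_modify]
  set D := md.foldl (fun d p => d.modify p.1 [] (fun l => l ++ [p.2])) PySem.Dict.empty with hD
  have hkeys : D.keys = PySem.List.dedup (md.map (·.1)) := by
    rw [hD, PySem.Dict.keys_foldl_modify_key]
    simp [PySem.Set.update_nil_left, PySem.List.dedup_eq_ofList]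
  have hnd : D.keys.Nodup := by
    rw [hD]
    exact PySem.Dict.nodup_keys_foldl_modify_key _ _ _ _ _ (by simp)
  rw [PySem.Dict.items_eq_map_keys D hnd [], hkeys]
  refine List.map_congr_left ?_
  intro k _
  have := PySem.Dict.getD_foldl_modify_append (d := PySem.Dict.empty) (l := md) (c := k)
  rw [hD, this]
  simp
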